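-- pv_equiv track=rewrite | github.com/lazakoa/misc | euler-py/general.py | tee
-- ===== SOURCE A (Python) =====
-- def tee(f, n):
--     """
--     returns a list of possible branches where each element in the list is
--     (i, new_f[2]), where i is what will be appended and new_f is the new
--     a0' term for the fraction
--     """
--     temp = []
--     counter = f[0] * f[2] # num * a0'
--     mirror = 0
--     flag = True
--
--     """
--     if counter // f[1] != 0 and (counter % f[1])**2 < n:
--         temp.append((counter // f[1], counter % f[1]))
--     """
--     while flag:
--         counter += f[1]
--         mirror -= f[1]
--         diff = (counter % f[1]) + mirror
--         if diff**2 < n: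
--             temp.append((counter // f[1], diff))
--         else:
--             return temp
--     return temp
-- ===== SOURCE B (Python) =====
-- def _isqrt(m):
--     # Newton's method floor square root for m >= 0 (A imports nothing, so no math.isqrt).
--     if m < 2:
--         return m
--     x = m
--     y = (m // x + x) // 2
--     while y < x:
--         x = y
--         y = (m // x + x) // 2
--     return x
--
--
-- def tee(f, n):
--     num, den = f[0] * f[2], f[1]
--     q = num // den          # raises ZeroDivisionError exactly where A does
--     r = num % den
--     if n <= 0:
--         return []
--     t = _isqrt(n - 1)       # largest t with t*t < n
--     k_max = (t + abs(r)) // abs(den)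
--     return [(q + k, r - k * den) for k in range(1, k_max + 1)]
-- ===== Notes on version B (the rewrite author's own statement) =====
-- stated objective: alternative
-- what changed: B replaces A's incremental counter/mirror while-loop by a closed form: it computes q, r once with divmod, finds the largest t with t*t < n via an integer Newton square root, derives the number of branches K = (t + |r|) // |f[1]| analytically, and builds the list with a single comprehension.
import Mathlib
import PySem

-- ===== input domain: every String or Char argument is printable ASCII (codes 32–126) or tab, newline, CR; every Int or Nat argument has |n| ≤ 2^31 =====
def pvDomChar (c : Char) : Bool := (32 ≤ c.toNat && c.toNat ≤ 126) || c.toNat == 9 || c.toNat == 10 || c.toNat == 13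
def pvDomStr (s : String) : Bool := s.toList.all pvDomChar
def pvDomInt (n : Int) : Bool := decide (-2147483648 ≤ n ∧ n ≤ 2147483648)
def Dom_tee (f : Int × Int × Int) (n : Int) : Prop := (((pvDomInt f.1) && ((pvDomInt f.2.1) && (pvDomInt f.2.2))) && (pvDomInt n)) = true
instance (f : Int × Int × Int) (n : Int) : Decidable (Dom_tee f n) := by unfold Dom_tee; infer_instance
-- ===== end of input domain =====

-- B computes the quotient/remainder once and the number of branches analytically
-- (integer Newton square root), replacing A's incremental counter/mirror while-loop.

-- ===== PORT A =====
-- A's while loop; the fuel argument only makes the recursion total (it is chosen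
-- large enough that it is never exhausted when f[1] ≠ 0; Pre_ excludes f[1] = 0,
-- where the Python raises ZeroDivisionError).
def teeLoopA (f1 n : Int) : Nat → Int → Int → List (Int × Int) → List (Int × Int)
  | 0, _, _, temp => temp
  | fuel + 1, counter, mirror, temp =>
    let counter' := counter + f1
    let mirror' := mirror - f1
    let diff := PySem.Int.mod counter' f1 + mirror'
    if diff ^ 2 < n then
      teeLoopA f1 n fuel counter' mirror' (temp ++ [(PySem.Int.floordiv counter' f1, diff)])
    else temp

def tee (f : Int × Int × Int) (n : Int) : List (Int × Int) :=
  teeLoopA f.2.1 n (n.natAbs + f.2.1.natAbs + 2) (f.1 * f.2.2) 0 []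

-- ===== PORT B =====
-- Newton's-method floor square root (Source B's _isqrt); recursion on the strictly
-- decreasing iterate x.
def isqrtLoop (m : Nat) (x : Nat) : Nat :=
  let y := (m / x + x) / 2
  if h : y < x then isqrtLoop m y else x
termination_by x
decreasing_by exact h

def isqrtB (m : Int) : Int :=
  if m < 2 then m else (isqrtLoop m.toNat m.toNat : Int)

def tee_alt (f : Int × Int × Int) (n : Int) : List (Int × Int) :=
  let num := f.1 * f.2.2
  let den := f.2.1
  let q := PySem.Int.floordiv num den
  let r := PySem.Int.mod num den
  if n ≤ 0 then []
  else
    let t := isqrtB (n - 1)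
    let kmax := PySem.Int.floordiv (t + |r|) |den|
    (PySem.List.pyRange 1 (kmax + 1) 1).map (fun k => (q + k, r - k * den))

-- ===== PRECONDITION & SPEC =====
-- Pre_ excludes exactly f[1] = 0, where Python A raises ZeroDivisionError (B raises too).
def Pre_tee (f : Int × Int × Int) (n : Int) : Prop := f.2.1 ≠ 0
instance (f : Int × Int × Int) (n : Int) : Decidable (Pre_tee f n) := by unfold Pre_tee; infer_instance

def pvWitness_tee : (Int × Int × Int) × Int := ((3, 2, 5), 10)

def Spec_tee (f : Int × Int × Int) (n : Int) (out : List (Int × Int)) : Prop := out = tee_alt f n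
instance (f : Int × Int × Int) (n : Int) (out : List (Int × Int)) : Decidable (Spec_tee f n out) := by unfold Spec_tee; infer_instance

-- ===== CLAIM (what is proved, stated in full; the proofs are below) =====
def Claim_equal_tee : Prop := ∀ (f : Int × Int × Int) (n : Int), Dom_tee f n → Pre_tee f n → Spec_tee f n (tee f n)

-- ===== LEMMAS AND PROOFS =====

-- Newton's iteration computes Nat.sqrt from any starting point above it.
theorem isqrtLoop_eq (m : Nat) : ∀ x : Nat, Nat.sqrt m ≤ x → isqrtLoop m x = Nat.sqrt m := by
  intro x
  induction x using Nat.strong_induction_on with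
  | _ x ih =>
    intro hs
    rw [isqrtLoop]
    set y := (m / x + x) / 2 with hy
    by_cases h : y < x
    · simp only [h, dite_true]
      refine ih y h ?_
      -- Nat.sqrt m ≤ y
      have hx0 : 0 < x := lt_of_le_of_lt (Nat.zero_le y) h
      by_cases hcase : 2 * Nat.sqrt m ≤ x
      · have h1 : Nat.sqrt m ≤ x / 2 := by omega
        have h2 : x / 2 ≤ y := Nat.div_le_div_right (Nat.le_add_left x (m / x))
        omega
      · -- x < 2 * sqrt m : show (2*s - x) ≤ m / x, hence s ≤ y
        set s := Nat.sqrt m with hsdef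
        have hsq : s * s ≤ m := by have := Nat.sqrt_le' m; nlinarith
        have hdiv : 2 * s - x ≤ m / x := by
          rw [Nat.le_div_iff_mul_le hx0]
          have hxs : x < 2 * s := by omega
          zify [le_of_lt hxs]
          nlinarith [sq_nonneg ((s : Int) - (x : Int))]
        omega
    · simp only [h, dite_false]
      -- x ≤ y, so x * x ≤ m, so x ≤ sqrt m; with hs, x = sqrt m
      rcases Nat.eq_zero_or_pos x with hx0 | hx0
      · have : Nat.sqrt m = 0 := by omega
        omega
      have hxy : x ≤ y := le_of_not_gt h
      have h2x : x * 2 ≤ m / x + x := by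
        have := (Nat.le_div_iff_mul_le (by norm_num : 0 < 2)).mp hxy
        omega
      have hxm : x ≤ m / x := by omega
      have hxx : x ^ 2 ≤ m := by
        have h3 : x * x ≤ m :=
          calc x * x ≤ (m / x) * x := Nat.mul_le_mul_right x hxm
          _ ≤ m := Nat.div_mul_le_self m x
        nlinarith
      have : x ≤ Nat.sqrt m := (Nat.le_sqrt').mpr hxx
      omega

theorem isqrtB_eq (m : Int) (hm : 0 ≤ m) : isqrtB m = (Nat.sqrt m.toNat : Int) := by
  unfold isqrtB
  by_cases h : m < 2
  · interval_cases m <;> simp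
  · simp only [h, if_false]
    rw [isqrtLoop_eq m.toNat m.toNat (Nat.sqrt_le_self m.toNat)]

-- floordiv / mod shift by a multiple of the divisor
theorem floordiv_add_mul (a b k : Int) (hb : b ≠ 0) :
    PySem.Int.floordiv (a + k * b) b = PySem.Int.floordiv a b + k := by
  rcases lt_or_gt_of_ne hb with hneg | hpos
  · have h1 := PySem.Int.floordiv_neg_neg (a + k * b) b
    have h2 := PySem.Int.floordiv_neg_neg a b
    -- floordiv x b = (-x) / (-b) adjusted; use characterization with positive -b
    have hb' : (0:Int) < -b := by omega
    have e1 : a + k * b = a + (-k) * (-b) := by ring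
    -- reduce to the positive-divisor case via negation of everything:
    -- floordiv x b for b < 0 equals -(floordiv (-x) (-b)) - (if mod ∣ …) ; easier: use floordiv_mul_add_mod characterization
    have m1 := PySem.Int.floordiv_mul_add_mod (a + k * b) b
    have m2 := PySem.Int.floordiv_mul_add_mod a b
    have bm1 := PySem.Int.mod_neg_bounds (a + k * b) hneg
    have bm2 := PySem.Int.mod_neg_bounds a hneg
    -- uniqueness of floor quotient
    nlinarith [m1, m2, bm1.1, bm1.2, bm2.1, bm2.2,
      mul_self_nonneg (PySem.Int.floordiv (a + k * b) b - PySem.Int.floordiv a b - k)]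
  · have m1 := PySem.Int.floordiv_mul_add_mod (a + k * b) b
    have m2 := PySem.Int.floordiv_mul_add_mod a b
    have bm1l := PySem.Int.mod_nonneg (a + k * b) hpos
    have bm1r := PySem.Int.mod_lt (a + k * b) hpos
    have bm2l := PySem.Int.mod_nonneg a hpos
    have bm2r := PySem.Int.mod_lt a hpos
    nlinarith [mul_self_nonneg (PySem.Int.floordiv (a + k * b) b - PySem.Int.floordiv a b - k)]

theorem mod_add_mul (a b k : Int) (hb : b ≠ 0) :
    PySem.Int.mod (a + k * b) b = PySem.Int.mod a b := by
  have m1 := PySem.Int.floordiv_mul_add_mod (a + k * b) b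
  have m2 := PySem.Int.floordiv_mul_add_mod a b
  have hd := floordiv_add_mul a b k hb
  linear_combination m1 - m2 - b * hd

-- The A-loop, started at the state reached after k-1 iterations, produces the tail
-- of B's closed-form list, provided the membership condition is characterized by k ≤ K.
theorem loopA_closed (den n num q r K : Int) (hden : den ≠ 0)
    (hq : q = PySem.Int.floordiv num den) (hr : r = PySem.Int.mod num den)
    (hcond : ∀ j : Int, 1 ≤ j → ((r - j * den) ^ 2 < n ↔ j ≤ K)) :
    ∀ (F : Nat) (k : Int) (acc : List (Int × Int)), 1 ≤ k → K < k + (F : Int) →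
      teeLoopA den n F (num + (k - 1) * den) (-((k - 1) * den)) acc =
        acc ++ (PySem.List.pyRange k (K + 1) 1).map (fun j => (q + j, r - j * den)) := by
  intro F
  induction F with
  | zero =>
    intro k acc hk hKF
    have : K + 1 ≤ k := by exact_mod_cast by omega
    rw [PySem.List.pyRange_one_eq_nil (by omega)]
    simp [teeLoopA]
  | succ F ih =>
    intro k acc hk hKF
    rw [teeLoopA]
    have hc : num + (k - 1) * den + den = num + k * den := by ring
    have hm : -((k - 1) * den) - den = -(k * den) := by ring
    have hmod : PySem.Int.mod (num + k * den) den = r := by rw [hr]; exact mod_add_mul num den k hden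
    have hdiv : PySem.Int.floordiv (num + k * den) den = q + k := by
      rw [hq]; exact floordiv_add_mul num den k hden
    simp only [hc, hm, hmod, hdiv]
    have hdiff : r + -(k * den) = r - k * den := by ring
    rw [hdiff]
    by_cases hin : (r - k * den) ^ 2 < n
    · have hkK : k ≤ K := (hcond k hk).mp hin
      simp only [hin, if_true]
      have e1 : num + k * den = num + ((k + 1) - 1) * den := by ring
      have e2 : -(k * den) = -(((k + 1) - 1) * den) := by ring
      have hKF' : K < (k + 1) + (F : Int) := by push_cast at hKF; omega
      rw [e1, e2, ih (k + 1) _ (by omega) hKF']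
      rw [PySem.List.pyRange_one_cons (show k < K + 1 by omega)]
      simp
    · have hkK : ¬ (k ≤ K) := fun h => hin ((hcond k hk).mpr h)
      simp only [hin, if_false]
      rw [PySem.List.pyRange_one_eq_nil (by omega)]
      simp

-- |num % den| < |den|, and the sign decomposition of r - j*den
theorem abs_mod_lt (num den : Int) (hden : den ≠ 0) :
    |PySem.Int.mod num den| < |den| := by
  rcases lt_or_gt_of_ne hden with hneg | hpos
  · have hb := PySem.Int.mod_neg_bounds num hneg
    rw [abs_of_nonpos hb.2, abs_of_neg hneg]; omega
  · have hbl := PySem.Int.mod_nonneg num hpos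
    have hbr := PySem.Int.mod_lt num hpos
    rw [abs_of_nonneg hbl, abs_of_pos hpos]; omega

-- floor-sqrt specification of B's Newton helper at n-1
theorem isqrt_spec (n : Int) (hn : 1 ≤ n) :
    0 ≤ isqrtB (n - 1) ∧ (isqrtB (n - 1)) ^ 2 ≤ n - 1 ∧ n - 1 < (isqrtB (n - 1) + 1) ^ 2 := by
  have ht : isqrtB (n - 1) = (Nat.sqrt (n - 1).toNat : Int) := isqrtB_eq (n - 1) (by omega)
  have hcast : ((n - 1).toNat : Int) = n - 1 := by omega
  have h1 := Nat.sqrt_le' (n - 1).toNat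
  have h2 := Nat.lt_succ_sqrt' (n - 1).toNat
  refine ⟨by rw [ht]; positivity, ?_, ?_⟩
  · rw [ht]
    have h1' : ((Nat.sqrt (n - 1).toNat ^ 2 : Nat) : Int) ≤ ((n - 1).toNat : Int) := by
      exact_mod_cast h1
    push_cast at h1'
    nlinarith [hcast]
  · rw [ht]
    have h2b := h2
    rw [Nat.succ_eq_add_one] at h2b
    have h2' : ((n - 1).toNat : Int) < (((n - 1).toNat.sqrt + 1 : Nat) : Int) ^ 2 := by
      exact_mod_cast h2b
    push_cast at h2'
    nlinarith [hcast]

-- Characterization of A's loop condition, for n ≥ 1.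
theorem cond_char (den num n : Int) (hden : den ≠ 0) (hn : 1 ≤ n) :
    ∀ j : Int, 1 ≤ j →
      ((PySem.Int.mod num den - j * den) ^ 2 < n ↔
        j ≤ PySem.Int.floordiv (isqrtB (n - 1) + |PySem.Int.mod num den|) |den|) := by
  intro j hj
  set r := PySem.Int.mod num den with hrdef
  set t := isqrtB (n - 1) with htdef
  have hrlt : |r| < |den| := abs_mod_lt num den hden
  have hdpos : (1:Int) ≤ |den| := by have := abs_pos.mpr hden; omega
  have hrnn : (0:Int) ≤ |r| := abs_nonneg r
  have hsq : (r - j * den) ^ 2 = (j * |den| - |r|) ^ 2 := by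
    rcases lt_or_gt_of_ne hden with hneg | hpos
    · have hb := PySem.Int.mod_neg_bounds num hneg
      rw [abs_of_nonpos hb.2, abs_of_neg hneg]; ring
    · have hbl := PySem.Int.mod_nonneg num hpos
      rw [abs_of_nonneg hbl, abs_of_pos hpos]; ring
  set a := j * |den| - |r| with hadef
  have ha1 : 1 ≤ a := by nlinarith
  obtain ⟨htnn, ht1, ht2⟩ := isqrt_spec n hn
  rw [← htdef] at htnn ht1 ht2
  rw [hsq]
  constructor
  · intro h
    have hat : a ≤ t := by
      by_contra hgt
      rw [not_le] at hgt
      have : t + 1 ≤ a := by omega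
      nlinarith
    rw [PySem.Int.le_floordiv_iff_mul_le (by omega)]
    nlinarith
  · intro h
    have := (PySem.Int.le_floordiv_iff_mul_le (by omega : (0:Int) < |den|)).mp h
    have hat : a ≤ t := by omega
    nlinarith

-- ===== VERDICT (by name: the statement is the Claim_ definition above) =====
theorem tee_spec : Claim_equal_tee := by
  intro f n _hdom hpre
  unfold Spec_tee tee tee_alt
  set num := f.1 * f.2.2 with hnum
  set den := f.2.1 with hden0
  have hden : den ≠ 0 := hpre
  set q := PySem.Int.floordiv num den with hq
  set r := PySem.Int.mod num den with hr
  set K : Int := if n ≤ 0 then 0 else PySem.Int.floordiv (isqrtB (n - 1) + |r|) |den| with hK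
  have hdpos : (1:Int) ≤ |den| := by have := abs_pos.mpr hden; omega
  have hcond : ∀ j : Int, 1 ≤ j → ((r - j * den) ^ 2 < n ↔ j ≤ K) := by
    intro j hj
    by_cases hn : n ≤ 0
    · rw [hK]
      simp only [hn, if_true]
      constructor
      · intro h; nlinarith [sq_nonneg (r - j * den)]
      · intro h; omega
    · rw [hK]
      simp only [hn, if_false]
      exact cond_char den num n hden (by omega) j hj
  have hKbound : K < 1 + ((n.natAbs + den.natAbs + 2 : Nat) : Int) := by
    by_cases hn : n ≤ 0
    · rw [hK]; simp only [hn, if_true]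
      have := Int.natCast_nonneg (n.natAbs + den.natAbs + 2)
      omega
    · rw [not_le] at hn
      rw [hK]
      simp only [not_le.mpr hn, if_false]
      set t := isqrtB (n - 1) with htdef
      set s := |r| with hsdef
      set d := |den| with hddef
      obtain ⟨htnn, ht1, _⟩ := isqrt_spec n (by omega)
      rw [← htdef] at htnn ht1
      have htn : t ≤ n - 1 := by nlinarith
      have hslt : s < d := abs_mod_lt num den hden
      have hsnn : (0:Int) ≤ s := abs_nonneg r
      set K' := PySem.Int.floordiv (t + s) d with hK'
      have hK'nn : 0 ≤ K' := by
        rw [hK', PySem.Int.le_floordiv_iff_mul_le (by omega)]; nlinarith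
      have hK'le : K' * d ≤ t + s := by
        exact (PySem.Int.le_floordiv_iff_mul_le (by omega)).mp (le_of_eq hK')
      have : K' ≤ K' * d := by nlinarith
      have hnabs : (n.natAbs : Int) = n := Int.natAbs_of_nonneg (by omega)
      have hdabs : (den.natAbs : Int) = d := by rw [hddef]; exact (Int.abs_eq_natAbs den).symm
      have hcastF : ((n.natAbs + den.natAbs + 2 : Nat) : Int) = (n.natAbs : Int) + (den.natAbs : Int) + 2 := by
        push_cast; ring
      rw [hcastF, hnabs, hdabs]
      linarith
  have hmain := loopA_closed den n num q r K hden hq hr hcond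
      (n.natAbs + den.natAbs + 2) 1 [] le_rfl hKbound
  have e1 : num + (1 - 1) * den = num := by ring
  have e2 : -(((1:Int) - 1) * den) = 0 := by ring
  rw [e1, e2] at hmain
  rw [hmain]
  by_cases hn : n ≤ 0
  · have hK0 : K = 0 := by rw [hK]; simp [hn]
    rw [hK0]
    simp only [hn, if_true]
    rw [PySem.List.pyRange_one_eq_nil (by omega)]
    simp
  · have hKv : K = PySem.Int.floordiv (isqrtB (n - 1) + |r|) |den| := by rw [hK]; simp [hn]
    simp only [hn, if_false]
    rw [hKv]
    rfl
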